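-- pv_equiv track=rewrite | github.com/ivi982010/SySdL-TPs | Lexer.py | a_BraOpen
-- ===== SOURCE A (Python) =====
-- def a_BraOpen (tokens, acu):
--     s = 0
--     for c in acu:
--         if c == '{':
--             s = 1
--         else:
--             s = -1
--     if s == 1:
--         tokens.append(("<BraOpen>", acu))
--     return (s == 1)
-- ===== SOURCE B (Python) =====
-- def a_BraOpen(tokens, acu):
--     ok = bool(acu) and acu[-1] == '{'
--     if ok:
--         tokens.append(("<BraOpen>", acu))
--     return ok
-- ===== Notes on version B (the rewrite author's own statement) =====
-- stated objective: simpler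
-- what changed: The per-character loop (whose final state depends only on the last character) is replaced by a direct O(1) check of acu's last character.
import Mathlib
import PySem

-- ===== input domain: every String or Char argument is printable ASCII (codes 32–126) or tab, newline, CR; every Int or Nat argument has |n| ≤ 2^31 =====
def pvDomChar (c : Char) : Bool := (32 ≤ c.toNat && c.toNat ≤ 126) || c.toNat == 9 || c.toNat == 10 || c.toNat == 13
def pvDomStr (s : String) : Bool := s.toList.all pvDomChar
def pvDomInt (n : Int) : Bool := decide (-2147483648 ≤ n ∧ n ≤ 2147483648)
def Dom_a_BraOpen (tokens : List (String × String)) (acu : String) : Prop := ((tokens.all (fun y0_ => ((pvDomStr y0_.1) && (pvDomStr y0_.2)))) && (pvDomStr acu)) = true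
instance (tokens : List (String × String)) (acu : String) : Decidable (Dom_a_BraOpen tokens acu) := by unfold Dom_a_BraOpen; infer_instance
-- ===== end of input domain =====

-- ===== PORT A =====
-- B replaces the character loop by a direct last-character check (O(1) vs O(n)); A also appends
-- to `tokens` in place when it returns true (B does the same); the theorem is about the return value.
def a_BraOpen (tokens : List (String × String)) (acu : String) : Bool :=
  let s : Int := acu.toList.foldl (fun _ c => if c = '{' then 1 else -1) 0
  s == 1

-- ===== PORT B =====
def a_BraOpen_alt (tokens : List (String × String)) (acu : String) : Bool :=
  match acu.toList.getLast? with
  | some c => c = '{'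
  | none => false

-- ===== PRECONDITION & SPEC =====
def Spec_a_BraOpen (tokens : List (String × String)) (acu : String) (out : Bool) : Prop := out = a_BraOpen_alt tokens acu
instance (tokens : List (String × String)) (acu : String) (out : Bool) : Decidable (Spec_a_BraOpen tokens acu out) := by unfold Spec_a_BraOpen; infer_instance

-- ===== CLAIM (what is proved, stated in full; the proofs are below) =====
def Claim_equal_a_BraOpen : Prop := ∀ (tokens : List (String × String)) (acu : String), Dom_a_BraOpen tokens acu → Spec_a_BraOpen tokens acu (a_BraOpen tokens acu)

-- ===== LEMMAS AND PROOFS =====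

-- ===== VERDICT (by name: the statement is the Claim_ definition above) =====
-- The loop's final state depends only on the last character.
theorem braFold_last (l : List Char) (s : Int) (h : l ≠ []) :
    l.foldl (fun _ c => if c = '{' then (1:Int) else -1) s
      = (if l.getLast h = '{' then 1 else -1) := by
  induction l generalizing s with
  | nil => exact absurd rfl h
  | cons a t ih =>
    cases t with
    | nil => simp [List.foldl]
    | cons b u =>
      rw [List.foldl_cons, ih _ (by simp)]
      simp [List.getLast]

theorem a_BraOpen_spec : Claim_equal_a_BraOpen := by
  intro tokens acu _
  unfold Spec_a_BraOpen a_BraOpen a_BraOpen_alt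
  cases h : acu.toList.getLast? with
  | none =>
    have : acu.toList = [] := List.getLast?_eq_none_iff.mp h
    simp [this]
  | some c =>
    have hne : acu.toList ≠ [] := by
      intro he; rw [he] at h; simp at h
    have hl : acu.toList.getLast hne = c := by
      have := List.getLast?_eq_some_getLast (l := acu.toList) hne
      rw [h] at this; exact (Option.some.inj this).symm
    simp only [braFold_last acu.toList 0 hne, hl]
    by_cases hc : c = '{' <;> simp [hc]
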